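-- pv_equiv track=rewrite | github.com/LoneHandyman/Compilers---Gengi-Language | gengi_py/Gscanner.py | clean_comments
-- ===== SOURCE A (Python) =====
-- def clean_comments(input):
--   def kmp(source, pattern, aux):
--     locations = list()
--     idx_src = 0
--     idx_pattern = 0
--
--     while idx_src < len(source):
--       if pattern[idx_pattern] == source[idx_src]:
--         idx_pattern += 1
--         idx_src += 1
--       if idx_pattern == len(pattern):
--         locations.append(idx_src - idx_pattern)
--         idx_pattern = aux[idx_pattern - 1]
--
--       if idx_src < len(source) and (pattern[idx_pattern] != source[idx_src]):
--         if idx_pattern: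
--           idx_pattern = aux[idx_pattern - 1]
--         else:
--           idx_src += 1
--     return locations
--
--   def prefix(pattern):
--     kmp_table = [0] * len(pattern)
--     j = 0
--     i = 1
--     while i < len(pattern):
--       if pattern[i] == pattern[j]:
--         j += 1
--         kmp_table[i] = j
--         i += 1
--       else:
--         if j:
--           j = kmp_table[j - 1]
--         else:
--           kmp_table[i] = 0
--           i += 1
--     return kmp_table
--
--   merged_content = ''
--   comm_pos_begin = list()
--   prefix_table = prefix(">>>")
--   idx = 0
--   code_lines = input.splitlines()
--   for idx in range(0, len(code_lines)):
--     comm_pos_begin = kmp(code_lines[idx], ">>>", prefix_table)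
--     if len(comm_pos_begin):
--       code_lines[idx] = code_lines[idx][0:comm_pos_begin[0]]
--     code_lines[idx] += '\n'
--     merged_content += code_lines[idx]
--   return merged_content
-- ===== SOURCE B (Python) =====
-- def clean_comments(input):
--   def strip_comment(line):
--     pos = line.find('>>>')
--     return line if pos == -1 else line[:pos]
--   return ''.join(strip_comment(line) + '\n' for line in input.splitlines())
-- ===== Notes on version B (the rewrite author's own statement) =====
-- stated objective: simpler
-- what changed: Replaced the hand-written KMP matcher and its prefix-table builder with a single str.find call per line and a str.join over a generator, removing the failure-function table and the dual-index while loop entirely.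
import Mathlib
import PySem

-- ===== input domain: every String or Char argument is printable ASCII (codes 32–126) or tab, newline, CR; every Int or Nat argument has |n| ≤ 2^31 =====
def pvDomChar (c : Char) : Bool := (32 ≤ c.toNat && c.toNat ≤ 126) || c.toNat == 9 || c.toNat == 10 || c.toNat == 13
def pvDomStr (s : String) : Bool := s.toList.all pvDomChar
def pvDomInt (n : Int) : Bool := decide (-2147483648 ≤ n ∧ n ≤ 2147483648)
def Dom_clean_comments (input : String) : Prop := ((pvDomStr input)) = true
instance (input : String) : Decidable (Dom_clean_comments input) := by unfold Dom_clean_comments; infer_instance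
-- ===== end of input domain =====

-- B replaces A's hand-written KMP matcher (prefix table + dual-index while scan) by one
-- str.find call per line; objective: simpler.

-- ===== PORT A =====
-- Python's two `while` loops are ported with a fuel counter that is provably larger than
-- the number of iterations (each iteration strictly increases 2*i - j), so the fuel never
-- runs out; in-range character reads are ported with getD, exactly as Python's s[i].
def pvKmpLoop (source pattern : List Char) (aux : List Nat) :
    Nat → Nat → Nat → List Nat → List Nat
  | 0, _, _, locs => locs
  | fuel + 1, i, j, locs =>
    if i < source.length then
      let p1 := if pattern.getD j ' ' = source.getD i ' ' then (i + 1, j + 1) else (i, j)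
      let i1 := p1.1; let j1 := p1.2
      let p2 := if j1 = pattern.length then (locs ++ [i1 - j1], aux.getD (j1 - 1) 0)
                else (locs, j1)
      let locs2 := p2.1; let j2 := p2.2
      if i1 < source.length ∧ pattern.getD j2 ' ' ≠ source.getD i1 ' ' then
        if j2 ≠ 0 then pvKmpLoop source pattern aux fuel i1 (aux.getD (j2 - 1) 0) locs2
        else pvKmpLoop source pattern aux fuel (i1 + 1) j2 locs2
      else pvKmpLoop source pattern aux fuel i1 j2 locs2
    else locs

def pvKmp (source pattern : List Char) (aux : List Nat) : List Nat :=
  pvKmpLoop source pattern aux (2 * source.length + 1) 0 0 []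

def pvPrefixLoop (pattern : List Char) : Nat → List Nat → Nat → Nat → List Nat
  | 0, tbl, _, _ => tbl
  | fuel + 1, tbl, j, i =>
    if i < pattern.length then
      if pattern.getD i ' ' = pattern.getD j ' ' then
        pvPrefixLoop pattern fuel (tbl.set i (j + 1)) (j + 1) (i + 1)
      else if j ≠ 0 then pvPrefixLoop pattern fuel tbl (tbl.getD (j - 1) 0) i
      else pvPrefixLoop pattern fuel (tbl.set i 0) j (i + 1)
    else tbl

def pvPrefix (pattern : List Char) : List Nat :=
  pvPrefixLoop pattern (2 * pattern.length + 1) (List.replicate pattern.length 0) 0 1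


def clean_comments (input : String) : String :=
  let prefix_table := pvPrefix ">>>".toList
  let code_lines := PySem.Str.splitlines input
  -- line[0:q] with 0 ≤ q ≤ len(line) is exactly List.take q on the code points
  String.mk <| code_lines.foldl (fun merged line =>
    let cl := line.toList
    let comm_pos_begin := pvKmp cl ">>>".toList prefix_table
    let cl2 := if comm_pos_begin.length ≠ 0 then cl.take (comm_pos_begin.getD 0 0) else cl
    merged ++ (cl2 ++ ['\n'])) []

-- ===== PORT B =====
-- line[:pos] with pos = line.find('>>>') ≥ 0 is exactly List.take pos.toNat
def pvStripComment (cl : List Char) : List Char :=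
  let pos := PySem.Chars.find cl ">>>".toList
  if pos = -1 then cl else cl.take pos.toNat


def clean_comments_alt (input : String) : String :=
  String.mk <| PySem.Chars.join []
    ((PySem.Str.splitlines input).map (fun line => pvStripComment line.toList ++ ['\n']))

-- ===== PRECONDITION & SPEC =====
def Spec_clean_comments (input : String) (out : String) : Prop := out = clean_comments_alt input
instance (input : String) (out : String) : Decidable (Spec_clean_comments input out) := by unfold Spec_clean_comments; infer_instance

-- ===== CLAIM (what is proved, stated in full; the proofs are below) =====
def Claim_equal_clean_comments : Prop := ∀ (input : String), Dom_clean_comments input → Spec_clean_comments input (clean_comments input)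

-- ===== LEMMAS AND PROOFS =====
def pvOcc (s : List Char) (q : Nat) : Bool :=
  decide (s.getD q ' ' = '>' ∧ s.getD (q+1) ' ' = '>' ∧ s.getD (q+2) ' ' = '>' ∧ q + 3 ≤ s.length)

theorem pv_filter_low (n a : Nat) (p : Nat → Bool) (h : p a = false) :
    (List.range n).filter (fun q => decide (a ≤ q) && p q)
      = (List.range n).filter (fun q => decide (a+1 ≤ q) && p q) := by
  apply List.filter_congr
  intro q _
  by_cases hq : q = a
  · subst hq; simp [h]
  · by_cases h2 : a ≤ q
    · have h3 : a + 1 ≤ q := by omega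
      simp [h2, h3]
    · have h3 : ¬ (a + 1 ≤ q) := by omega
      simp [h2, h3]

theorem pv_filter_cons (n a : Nat) (p : Nat → Bool) (ha : a < n) (hp : p a = true) :
    (List.range n).filter (fun q => decide (a ≤ q) && p q)
      = a :: (List.range n).filter (fun q => decide (a+1 ≤ q) && p q) := by
  induction n with
  | zero => omega
  | succ n ih =>
    rw [List.range_succ, List.filter_append, List.filter_append]
    by_cases h : a < n
    · rw [ih h]
      have h1 : (decide (a ≤ n) : Bool) = true := by simp; omega
      have h2 : (decide (a + 1 ≤ n) : Bool) = true := by simp; omega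
      simp only [List.cons_append, List.filter_cons, List.filter_nil, h1, h2, Bool.true_and]
    · have han : a = n := by omega
      subst han
      have h1 : (List.range a).filter (fun q => decide (a ≤ q) && p q) = [] := by
        rw [List.filter_eq_nil_iff]
        intro q hq
        simp only [List.mem_range] at hq
        simp [Nat.not_le.mpr hq]
      have h2 : (List.range a).filter (fun q => decide (a+1 ≤ q) && p q) = [] := by
        rw [List.filter_eq_nil_iff]
        intro q hq
        simp only [List.mem_range] at hq
        have : ¬ (a + 1 ≤ q) := by omega
        simp [this]
      rw [h1, h2]
      have h3 : (decide (a ≤ a) : Bool) = true := by simp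
      have h4 : (decide (a + 1 ≤ a) : Bool) = false := by simp
      simp only [List.nil_append, List.filter_cons, List.filter_nil, h3, h4, hp, Bool.true_and,
        Bool.false_and, if_true, if_false, Bool.false_eq_true]

theorem pv_triple_prefix (l : List Char) :
    (['>','>','>'] <+: l) ↔ l[0]? = some '>' ∧ l[1]? = some '>' ∧ l[2]? = some '>' := by
  match l with
  | [] => simp
  | [a] => simp [List.cons_prefix_cons]
  | [a, b] => simp [List.cons_prefix_cons]
  | a :: b :: c :: t => simp [List.cons_prefix_cons, eq_comm]

theorem pv_occ_iff (s : List Char) (q : Nat) :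
    pvOcc s q = true ↔ (['>','>','>'] <+: s.drop q) := by
  rw [pv_triple_prefix]
  unfold pvOcc
  simp only [decide_eq_true_eq, List.getElem?_drop, List.getD_eq_getElem?_getD]
  have comp : ∀ m, m < s.length → ((s[m]?).getD ' ' = '>' ↔ s[m]? = some '>') := by
    intro m hm
    rw [List.getElem?_eq_getElem hm]
    simp
  constructor
  · rintro ⟨h0, h1, h2, h3⟩
    exact ⟨(comp q (by omega)).mp h0, (comp (q+1) (by omega)).mp h1, (comp (q+2) (by omega)).mp h2⟩
  · rintro ⟨h0, h1, h2⟩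
    have hl : q + 2 < s.length := by
      by_contra h
      rw [List.getElem?_eq_none (by omega)] at h2
      simp at h2
    exact ⟨(comp q (by omega)).mpr h0, (comp (q+1) (by omega)).mpr h1,
      (comp (q+2) (by omega)).mpr h2, by omega⟩
-- ===== PORT A =====
-- the `while` loops are ported with a fuel counter large enough for the loop's
-- 2*i - j progress measure (each iteration strictly increases it), so the fuel
-- never runs out; characters are read with getD, guarded exactly as Python's
-- in-range indices are.

theorem pv_pat_getD (j : Nat) (hj : j ≤ 2) : (['>','>','>'] : List Char).getD j ' ' = '>' := by
  interval_cases j <;> rfl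

theorem pvKmpLoop_eq (s : List Char) :
    ∀ (fuel i j : Nat) (locs : List Nat), j ≤ 2 → j ≤ i → i ≤ s.length →
    (∀ k, k < j → s.getD (i - j + k) ' ' = '>') →
    2 * (s.length - i) + j + 1 ≤ fuel →
    pvKmpLoop s ['>','>','>'] [0,1,2] fuel i j locs
      = locs ++ (List.range s.length).filter (fun q => decide (i - j ≤ q) && pvOcc s q) := by
  intro fuel
  induction fuel with
  | zero => intro i j locs _ _ _ _ hf; omega
  | succ fuel ih =>
    intro i j locs hj hji hi htr hf
    by_cases hin : i < s.length
    case neg =>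
      have hfe : (List.range s.length).filter (fun q => decide (i - j ≤ q) && pvOcc s q) = [] := by
        rw [List.filter_eq_nil_iff]
        intro q hq
        simp only [List.mem_range] at hq
        by_cases h1 : i - j ≤ q
        · by_cases h2 : pvOcc s q = true
          · exfalso
            unfold pvOcc at h2
            simp only [decide_eq_true_eq] at h2
            omega
          · simp [h2]
        · simp [h1]
      rw [pvKmpLoop, if_neg hin, hfe, List.append_nil]
    case pos =>
      rw [pvKmpLoop, if_pos hin]
      by_cases hc : s.getD i ' ' = '>'
      case pos =>
        by_cases hj2 : j = 2
        case pos =>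
          subst hj2
          have hocc : pvOcc s (i - 2) = true := by
            unfold pvOcc
            simp only [decide_eq_true_eq]
            have t0 := htr 0 (by omega)
            have t1 := htr 1 (by omega)
            simp only [Nat.add_zero] at t0
            refine ⟨t0, t1, ?_, by omega⟩
            have e : i - 2 + 2 = i := by omega
            rw [e]; exact hc
          have hext : (List.range s.length).filter (fun q => decide (i ≤ q + 2) && pvOcc s q)
              = (List.range s.length).filter (fun q => decide (i - 2 ≤ q) && pvOcc s q) := by
            apply List.filter_congr
            intro q _
            have e : (decide (i ≤ q + 2) : Bool) = decide (i - 2 ≤ q) := by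
              rw [decide_eq_decide]; omega
            rw [e]
          simp only [show (['>','>','>'] : List Char).getD 2 ' ' = '>' from rfl, hc,
            List.length_cons, List.length_nil]
          norm_num [List.getD]
          rw [hext]
          by_cases hm : i + 1 < s.length ∧ ¬'>' = s[i + 1]?.getD ' '
          case pos =>
            rw [if_pos hm]
            rw [ih (i+1) 1 (locs ++ [i + 1 - 3]) (by omega) (by omega) (by omega)
              (by intro k hk
                  have e : i + 1 - 1 + k = i := by omega
                  rw [e]; exact hc)
              (by omega)]
            have hocc1 : pvOcc s (i - 1) = false := by
              rw [← Bool.not_eq_true]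
              unfold pvOcc
              simp only [decide_eq_true_eq]
              rintro ⟨h0, h1, h2, h3⟩
              have e : i - 1 + 2 = i + 1 := by omega
              rw [e] at h2
              exact hm.2 h2.symm
            rw [pv_filter_cons s.length (i-2) _ (by omega) hocc]
            rw [show i - 2 + 1 = i - 1 by omega]
            rw [pv_filter_low s.length (i-1) _ hocc1]
            rw [show i - 1 + 1 = i by omega, show i + 1 - 1 = i from rfl,
              show i + 1 - 3 = i - 2 by omega]
            simp
          case neg =>
            rw [if_neg hm]
            rw [ih (i+1) 2 (locs ++ [i + 1 - 3]) (by omega) (by omega) (by omega)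
              (by intro k hk
                  interval_cases k
                  · have e : i + 1 - 2 + 0 = i - 2 + 1 := by omega
                    rw [e]; exact htr 1 (by omega)
                  · have e : i + 1 - 2 + 1 = i := by omega
                    rw [e]; exact hc)
              (by omega)]
            rw [pv_filter_cons s.length (i-2) _ (by omega) hocc]
            rw [show i - 2 + 1 = i + 1 - 2 by omega, show i + 1 - 3 = i - 2 by omega]
            simp
        case neg =>
          -- j ≤ 1 : partial-match advance
          have hj1 : j ≤ 1 := by omega
          have hne3 : ¬(j + 1 = 3) := by omega
          have haux : ([0,1,2] : List Nat).getD j 0 = j := by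
            interval_cases j <;> rfl
          simp only [pv_pat_getD j hj, hc, List.length_cons, List.length_nil]
          norm_num [hne3, List.getD] at haux ⊢
          have hp2 : (['>','>'] : List Char)[j]?.getD ' ' = '>' := by
            interval_cases j <;> rfl
          rw [← List.getD_eq_getElem?_getD] at haux
          simp only [hp2, ← List.getD_eq_getElem?_getD, haux]
          have hext : (List.range s.length).filter (fun q => decide (i ≤ q + j) && pvOcc s q)
              = (List.range s.length).filter (fun q => decide (i - j ≤ q) && pvOcc s q) := by
            apply List.filter_congr
            intro q _
            have e : (decide (i ≤ q + j) : Bool) = decide (i - j ≤ q) := by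
              rw [decide_eq_decide]; omega
            rw [e]
          rw [hext]
          by_cases hm : i + 1 < s.length ∧ ¬'>' = s.getD (i + 1) ' '
          case pos =>
            rw [if_pos hm]
            rw [ih (i+1) j locs (by omega) (by omega) (by omega)
              (by intro k hk
                  by_cases hkj : k + 1 = j
                  · have e : i + 1 - j + k = i := by omega
                    rw [e]; exact hc
                  · have e : i + 1 - j + k = i - j + (k + 1) := by omega
                    rw [e]; exact htr (k+1) (by omega))
              (by omega)]
            have hoccF : pvOcc s (i - j) = false := by
              rw [← Bool.not_eq_true]
              unfold pvOcc
              simp only [decide_eq_true_eq]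
              rintro ⟨h0, h1, h2, h3⟩
              apply hm.2
              interval_cases j
              · have e : i - 0 + 1 = i + 1 := by omega
                rw [e] at h1; exact h1.symm
              · have e : i - 1 + 2 = i + 1 := by omega
                rw [e] at h2; exact h2.symm
            rw [pv_filter_low s.length (i-j) _ hoccF, show i - j + 1 = i + 1 - j by omega]
          case neg =>
            rw [if_neg hm]
            rw [ih (i+1) (j+1) locs (by omega) (by omega) (by omega)
              (by intro k hk
                  by_cases hkj : k = j
                  · have e : i + 1 - (j + 1) + k = i := by omega
                    rw [e]; exact hc
                  · have e : i + 1 - (j + 1) + k = i - j + k := by omega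
                    rw [e]; exact htr k (by omega))
              (by omega)]
            rw [show i + 1 - (j + 1) = i - j by omega]
      case neg =>
        have hc' : ¬((['>','>','>'] : List Char).getD j ' ' = s.getD i ' ') := by
          rw [pv_pat_getD j hj]
          exact fun h => hc h.symm
        have hne3 : ¬(j = 3) := by omega
        simp only [hc', List.length_cons, List.length_nil]
        norm_num [hne3, List.getD]
        have hp3 : (['>','>','>'] : List Char)[j]?.getD ' ' = '>' := by
          interval_cases j <;> rfl
        simp only [hp3, ← List.getD_eq_getElem?_getD]
        rw [if_pos ⟨hin, fun h => hc h.symm⟩]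
        have hext : (List.range s.length).filter (fun q => decide (i ≤ q + j) && pvOcc s q)
            = (List.range s.length).filter (fun q => decide (i - j ≤ q) && pvOcc s q) := by
          apply List.filter_congr
          intro q _
          have e : (decide (i ≤ q + j) : Bool) = decide (i - j ≤ q) := by
            rw [decide_eq_decide]; omega
          rw [e]
        rw [hext]
        have hoccF : pvOcc s (i - j) = false := by
          rw [← Bool.not_eq_true]
          unfold pvOcc
          simp only [decide_eq_true_eq]
          rintro ⟨h0, h1, h2, h3⟩
          apply hc
          interval_cases j
          · simpa using h0
          · have e : i - 1 + 1 = i := by omega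
            rw [e] at h1; exact h1
          · have e : i - 2 + 2 = i := by omega
            rw [e] at h2; exact h2
        by_cases hj0 : j = 0
        case pos =>
          subst hj0
          rw [if_pos rfl]
          rw [ih (i+1) 0 locs (by omega) (by omega) (by omega) (by intro k hk; omega)
            (by omega)]
          rw [pv_filter_low s.length (i-0) _ hoccF, show i - 0 + 1 = i + 1 - 0 by omega]
        case neg =>
          rw [if_neg hj0]
          have haux2 : ([0,1,2] : List Nat).getD (j-1) 0 = j - 1 := by
            interval_cases j <;> rfl
          rw [haux2]
          rw [ih i (j-1) locs (by omega) (by omega) hi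
            (by intro k hk
                have e : i - (j - 1) + k = i - j + (k + 1) := by omega
                rw [e]; exact htr (k+1) (by omega))
            (by omega)]
          rw [pv_filter_low s.length (i-j) _ hoccF, show i - j + 1 = i - (j - 1) by omega]

theorem pv_toList : ">>>".toList = ['>','>','>'] := by decide

theorem pvKmp_eq (s : List Char) :
    pvKmp s ['>','>','>'] [0,1,2] = (List.range s.length).filter (pvOcc s) := by
  unfold pvKmp
  rw [pvKmpLoop_eq s _ 0 0 [] (by omega) (by omega) (by omega) (by intro k hk; omega)
    (by omega)]
  simp

theorem pv_occ_lt (s : List Char) (q : Nat) (h : pvOcc s q = true) : q < s.length := by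
  unfold pvOcc at h
  simp only [decide_eq_true_eq] at h
  omega

theorem pv_strip_eq (cl : List Char) :
    (if (pvKmp cl ['>','>','>'] [0,1,2]).length ≠ 0
     then cl.take ((pvKmp cl ['>','>','>'] [0,1,2]).getD 0 0) else cl)
    = pvStripComment cl := by
  rw [pvKmp_eq]
  unfold pvStripComment
  rw [pv_toList]
  rcases hF : (List.range cl.length).filter (pvOcc cl) with _ | ⟨q, rest⟩
  · have hfind : PySem.Chars.find cl ['>','>','>'] = -1 := by
      rw [PySem.Chars.find_eq_neg_one_iff]
      intro hinf
      obtain ⟨j, hj⟩ := (PySem.Chars.exists_prefix_drop_iff_isIn _ _).mpr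
        ((PySem.Chars.isIn_iff_infix _ _).mpr hinf)
      have hocc : pvOcc cl j = true := (pv_occ_iff cl j).mpr hj
      have : j ∈ (List.range cl.length).filter (pvOcc cl) := by
        rw [List.mem_filter, List.mem_range]
        exact ⟨pv_occ_lt cl j hocc, hocc⟩
      rw [hF] at this
      simp at this
    simp [hfind]
  · have hq : q ∈ (List.range cl.length).filter (pvOcc cl) := by rw [hF]; simp
    rw [List.mem_filter, List.mem_range] at hq
    have hmin : ∀ r, pvOcc cl r = true → q ≤ r := by
      intro r hr
      have hrmem : r ∈ (List.range cl.length).filter (pvOcc cl) := by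
        rw [List.mem_filter, List.mem_range]
        exact ⟨pv_occ_lt cl r hr, hr⟩
      rw [hF] at hrmem
      have hpw : ((List.range cl.length).filter (pvOcc cl)).Pairwise (· < ·) :=
        (List.pairwise_lt_range).filter _
      rw [hF] at hpw
      rcases List.mem_cons.mp hrmem with h | h
      · omega
      · have := (List.pairwise_cons.mp hpw).1 r h
        omega
    have hinf : ['>','>','>'] <:+: cl := by
      rw [← PySem.Chars.isIn_iff_infix]
      rw [← PySem.Chars.exists_prefix_drop_iff_isIn]
      exact ⟨q, (pv_occ_iff cl q).mp hq.2⟩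
    have hf0 : 0 ≤ PySem.Chars.find cl ['>','>','>'] :=
      (PySem.Chars.find_nonneg_iff _ _).mpr hinf
    obtain ⟨hpref, hleast⟩ := PySem.Chars.find_spec hf0
    have h1 : (PySem.Chars.find cl ['>','>','>']).toNat ≤ q := by
      by_contra h
      exact hleast q (by omega) ((pv_occ_iff cl q).mp hq.2)
    have h2 : q ≤ (PySem.Chars.find cl ['>','>','>']).toNat :=
      hmin _ ((pv_occ_iff cl _).mpr hpref)
    have hfq : (PySem.Chars.find cl ['>','>','>']).toNat = q := by omega
    have hne : ¬(PySem.Chars.find cl ['>','>','>'] = -1) := by omega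
    rw [if_neg hne, hfq]
    simp


theorem pvPrefix_eq' : pvPrefix ['>','>','>'] = [0,1,2] := by decide

theorem pv_fold_join (g : String → List Char) : ∀ (lines : List String) (acc : List Char),
    lines.foldl (fun m l => m ++ g l) acc = acc ++ PySem.Chars.join [] (lines.map g) := by
  intro lines
  induction lines with
  | nil => intro acc; simp [PySem.Chars.join, List.intercalate]
  | cons a rest ih =>
    intro acc
    rw [List.foldl_cons, ih, List.map_cons]
    cases rest with
    | nil => simp [PySem.Chars.join, List.intercalate]
    | cons b t =>
      rw [List.map_cons, PySem.Chars.join_cons_cons, ← List.map_cons]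
      simp


theorem pv_main (input : String) : clean_comments input = clean_comments_alt input := by
  unfold clean_comments clean_comments_alt
  simp only [pv_toList, pvPrefix_eq']
  congr 1
  rw [pv_fold_join (fun line =>
    (if (pvKmp line.toList ['>','>','>'] [0,1,2]).length ≠ 0
     then line.toList.take ((pvKmp line.toList ['>','>','>'] [0,1,2]).getD 0 0)
     else line.toList) ++ ['\n'])]
  rw [List.nil_append]
  congr 1
  apply List.map_congr_left
  intro l _
  rw [pv_strip_eq l.toList]

-- ===== VERDICT (by name: the statement is the Claim_ definition above) =====
theorem clean_comments_spec : Claim_equal_clean_comments := by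
  intro input _
  unfold Spec_clean_comments
  exact pv_main input
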